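-- pv_equiv track=rewrite | github.com/rmilene02/OpenManus-BugHunting | app/fuzzer/intelligent_fuzzer.py | _assess_response_risk
-- ===== SOURCE A (Python) =====
-- from typing import Dict, List, Any, Optional, Set, Tuple
--
-- def _assess_response_risk(indicators: List[str]) -> str:
--     """Assess risk level based on response indicators"""
--     high_risk_patterns = ['error', 'exception', 'mysql', 'postgresql', 'stack trace']
--     medium_risk_patterns = ['status code changed', 'size changed', 'slow response']
--
--     for indicator in indicators:
--         indicator_lower = indicator.lower()
--         if any(pattern in indicator_lower for pattern in high_risk_patterns):
--             return 'high'
--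
--     for indicator in indicators:
--         indicator_lower = indicator.lower()
--         if any(pattern in indicator_lower for pattern in medium_risk_patterns):
--             return 'medium'
--
--     return 'low'
-- ===== SOURCE B (Python) =====
-- def _assess_response_risk(indicators):
--     """Assess risk level based on response indicators (single pass)."""
--     high_risk_patterns = ['error', 'exception', 'mysql', 'postgresql', 'stack trace']
--     medium_risk_patterns = ['status code changed', 'size changed', 'slow response']
--
--     saw_medium = False
--     for indicator in indicators:
--         indicator_lower = indicator.lower()
--         if any(pattern in indicator_lower for pattern in high_risk_patterns):
--             return 'high'
--         saw_medium = saw_medium or any(pattern in indicator_lower for pattern in medium_risk_patterns)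
--     return 'medium' if saw_medium else 'low'
-- ===== Notes on version B (the rewrite author's own statement) =====
-- stated objective: alternative
-- what changed: Replaces A's two full passes over the indicator list with a single pass that lowercases each indicator once, returns 'high' immediately on a high-risk match, and accumulates a saw_medium flag that decides 'medium' vs 'low' after the loop.
import Mathlib
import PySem

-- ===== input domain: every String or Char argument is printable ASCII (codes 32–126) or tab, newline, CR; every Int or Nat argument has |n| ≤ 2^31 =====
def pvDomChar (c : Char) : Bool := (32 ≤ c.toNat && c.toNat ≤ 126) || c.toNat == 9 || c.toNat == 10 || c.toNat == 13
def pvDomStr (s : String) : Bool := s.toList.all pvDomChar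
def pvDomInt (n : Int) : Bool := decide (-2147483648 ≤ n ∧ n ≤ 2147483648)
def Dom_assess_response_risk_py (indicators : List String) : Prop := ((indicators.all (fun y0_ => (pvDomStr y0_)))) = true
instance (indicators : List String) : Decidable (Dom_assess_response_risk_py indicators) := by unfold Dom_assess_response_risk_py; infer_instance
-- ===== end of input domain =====

-- B: single pass accumulating a saw_medium flag, instead of A's two full passes (objective: alternative decomposition).
-- ===== PORT A =====
-- pattern lists, identical literals in Source A and Source B
def pvHighPats : List String := ["error", "exception", "mysql", "postgresql", "stack trace"]
def pvMedPats : List String := ["status code changed", "size changed", "slow response"]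

-- first 'for' loop of A: return 'high' on a high-risk match
def pvALoop1 : List String → Option String
  | [] => none
  | ind :: rest =>
    let il := PySem.Str.lower ind
    if pvHighPats.any (fun p => PySem.Str.isIn p il) then some "high" else pvALoop1 rest

-- second 'for' loop of A: return 'medium' on a medium-risk match
def pvALoop2 : List String → Option String
  | [] => none
  | ind :: rest =>
    let il := PySem.Str.lower ind
    if pvMedPats.any (fun p => PySem.Str.isIn p il) then some "medium" else pvALoop2 rest

def assess_response_risk_py (indicators : List String) : String :=
  match pvALoop1 indicators with
  | some r => r
  | none =>
    match pvALoop2 indicators with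
    | some r => r
    | none => "low"

-- ===== PORT B =====
-- the single loop of B, carrying the saw_medium flag
def pvBLoop : List String → Bool → String
  | [], sawMedium => if sawMedium then "medium" else "low"
  | ind :: rest, sawMedium =>
    let il := PySem.Str.lower ind
    if pvHighPats.any (fun p => PySem.Str.isIn p il) then "high"
    else pvBLoop rest (sawMedium || pvMedPats.any (fun p => PySem.Str.isIn p il))

def assess_response_risk_py_alt (indicators : List String) : String :=
  pvBLoop indicators false

-- ===== PRECONDITION & SPEC =====
def Spec_assess_response_risk_py (indicators : List String) (out : String) : Prop := out = assess_response_risk_py_alt indicators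
instance (indicators : List String) (out : String) : Decidable (Spec_assess_response_risk_py indicators out) := by unfold Spec_assess_response_risk_py; infer_instance

-- ===== CLAIM (what is proved, stated in full; the proofs are below) =====
def Claim_equal_assess_response_risk_py : Prop := ∀ (indicators : List String), Dom_assess_response_risk_py indicators → Spec_assess_response_risk_py indicators (assess_response_risk_py indicators)

-- ===== LEMMAS AND PROOFS =====

-- ===== VERDICT (by name: the statement is the Claim_ definition above) =====
def pvH (ind : String) : Bool := pvHighPats.any (fun p => PySem.Str.isIn p (PySem.Str.lower ind))
def pvM (ind : String) : Bool := pvMedPats.any (fun p => PySem.Str.isIn p (PySem.Str.lower ind))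

theorem pvALoop1_eq (inds : List String) :
    pvALoop1 inds = if inds.any pvH then some "high" else none := by
  induction inds with
  | nil => simp [pvALoop1]
  | cons ind rest ih =>
    simp only [pvALoop1, List.any_cons, ih, pvH]
    by_cases h : pvHighPats.any (fun p => PySem.Str.isIn p (PySem.Str.lower ind)) = true
    · simp only [h]; simp
    · simp only [Bool.not_eq_true] at h; simp only [h]; simp

theorem pvALoop2_eq (inds : List String) :
    pvALoop2 inds = if inds.any pvM then some "medium" else none := by
  induction inds with
  | nil => simp [pvALoop2]
  | cons ind rest ih =>
    simp only [pvALoop2, List.any_cons, ih, pvM]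
    by_cases h : pvMedPats.any (fun p => PySem.Str.isIn p (PySem.Str.lower ind)) = true
    · simp only [h]; simp
    · simp only [Bool.not_eq_true] at h; simp only [h]; simp

theorem pvBLoop_eq (inds : List String) (saw : Bool) :
    pvBLoop inds saw =
      if inds.any pvH then "high"
      else if saw || inds.any pvM then "medium" else "low" := by
  induction inds generalizing saw with
  | nil => cases saw <;> simp [pvBLoop]
  | cons ind rest ih =>
    simp only [pvBLoop, List.any_cons, ih, pvH, pvM]
    by_cases hh : pvHighPats.any (fun p => PySem.Str.isIn p (PySem.Str.lower ind)) = true <;>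
      by_cases hm : pvMedPats.any (fun p => PySem.Str.isIn p (PySem.Str.lower ind)) = true <;>
        simp only [Bool.not_eq_true] at hh hm ⊢ <;> simp only [hh, hm] <;>
          cases saw <;> simp [Bool.or_assoc, or_assoc]

theorem assess_response_risk_py_spec : Claim_equal_assess_response_risk_py := by
  intro inds _
  unfold Spec_assess_response_risk_py assess_response_risk_py assess_response_risk_py_alt
  rw [pvALoop1_eq, pvALoop2_eq, pvBLoop_eq]
  by_cases hh : inds.any pvH = true
  · simp [hh]
  · by_cases hm : inds.any pvM = true <;> simp [hh, hm]
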